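-- pv_equiv track=rewrite | github.com/khoaHyh/skills | sharingan/scripts/build_context_bundle.py | _tail_overlap
-- ===== SOURCE A (Python) =====
-- def _tail_overlap(lines: list[str], overlap_chars: int) -> list[str]:
--     if overlap_chars <= 0:
--         return []
--     tail: list[str] = []
--     char_count = 0
--     for line in reversed(lines):
--         tail.insert(0, line)
--         char_count += len(line)
--         if char_count >= overlap_chars:
--             break
--     return tail
-- ===== SOURCE B (Python) =====
-- def _tail_overlap(lines: list[str], overlap_chars: int) -> list[str]:
--     if overlap_chars <= 0:
--         return []
--     total = sum(len(line) for line in lines)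
--     start = 0
--     remaining = total
--     # drop leading lines while the suffix after them still meets the threshold
--     while start < len(lines) and remaining - len(lines[start]) >= overlap_chars:
--         remaining -= len(lines[start])
--         start += 1
--     return lines[start:]
-- ===== Notes on version B (the rewrite author's own statement) =====
-- stated objective: alternative
-- what changed: Instead of prepending lines while scanning backwards with break, B computes the total character count in one pass and scans forward dropping leading lines while the remaining suffix still meets the threshold, returning a slice.
import Mathlib
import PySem

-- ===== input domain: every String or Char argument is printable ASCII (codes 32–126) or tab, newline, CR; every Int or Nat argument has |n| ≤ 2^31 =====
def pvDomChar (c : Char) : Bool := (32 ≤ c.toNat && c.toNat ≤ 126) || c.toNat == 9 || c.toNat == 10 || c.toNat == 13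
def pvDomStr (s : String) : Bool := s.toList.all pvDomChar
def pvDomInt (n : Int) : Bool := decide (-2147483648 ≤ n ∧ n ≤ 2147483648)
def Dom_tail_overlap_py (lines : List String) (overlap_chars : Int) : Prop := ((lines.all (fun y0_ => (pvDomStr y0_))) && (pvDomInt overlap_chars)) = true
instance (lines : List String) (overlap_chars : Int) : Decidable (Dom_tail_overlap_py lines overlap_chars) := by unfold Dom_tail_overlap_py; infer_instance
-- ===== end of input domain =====

-- B replaces A's backward prepend-until-break loop by a one-pass total character count
-- plus a forward drop-while scan returning a slice (alternative decomposition, same values).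

-- ===== PORT A =====
-- the 'for line in reversed(lines): … break' loop: state (tail, char_count), early exit on break
def pvTailLoopA (overlap_chars : Int) : List String → List String → Int → List String
  | [], tail, _ => tail
  | line :: rest, tail, char_count =>
      let tail' := PySem.List.insert tail 0 line
      let char_count' := char_count + PySem.Str.len line
      if char_count' ≥ overlap_chars then tail'
      else pvTailLoopA overlap_chars rest tail' char_count'

def tail_overlap_py (lines : List String) (overlap_chars : Int) : List String :=
  if overlap_chars ≤ 0 then []
  else pvTailLoopA overlap_chars lines.reverse [] 0

-- ===== PORT B =====
-- the 'while start < len(lines) and remaining - len(lines[start]) >= overlap_chars' loop,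
-- returning lines[start:] : recursion on the not-yet-dropped suffix with 'remaining'
def pvDropLoopB (overlap_chars : Int) : List String → Int → List String
  | [], _ => []
  | line :: rest, remaining =>
      if remaining - PySem.Str.len line ≥ overlap_chars then
        pvDropLoopB overlap_chars rest (remaining - PySem.Str.len line)
      else line :: rest

def tail_overlap_py_alt (lines : List String) (overlap_chars : Int) : List String :=
  if overlap_chars ≤ 0 then []
  else
    let total := lines.foldl (fun acc line => acc + PySem.Str.len line) 0
    pvDropLoopB overlap_chars lines total

-- ===== PRECONDITION & SPEC =====
def Spec_tail_overlap_py (lines : List String) (overlap_chars : Int) (out : List String) : Prop := out = tail_overlap_py_alt lines overlap_chars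
instance (lines : List String) (overlap_chars : Int) (out : List String) : Decidable (Spec_tail_overlap_py lines overlap_chars out) := by unfold Spec_tail_overlap_py; infer_instance

-- ===== CLAIM (what is proved, stated in full; the proofs are below) =====
def Claim_equal_tail_overlap_py : Prop := ∀ (lines : List String) (overlap_chars : Int), Dom_tail_overlap_py lines overlap_chars → Spec_tail_overlap_py lines overlap_chars (tail_overlap_py lines overlap_chars)

-- ===== LEMMAS AND PROOFS =====

-- total character count of a list of lines
def pvS (xs : List String) : Int := (xs.map PySem.Str.len).sum

-- reference suffix function: drop the head while the rest still meets the threshold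
def pvG (overlap_chars : Int) : List String → List String
  | [] => []
  | line :: rest => if pvS rest ≥ overlap_chars then pvG overlap_chars rest else line :: rest

theorem pvStrLen_nonneg (s : String) : 0 ≤ PySem.Str.len s := by
  simp [PySem.Str.len_eq]

theorem pvS_nonneg (xs : List String) : 0 ≤ pvS xs := by
  induction xs with
  | nil => simp [pvS]
  | cons x xs ih =>
      have := pvStrLen_nonneg x
      simp only [pvS, List.map_cons, List.sum_cons] at *
      omega

theorem pvS_foldl (xs : List String) (acc : Int) :
    xs.foldl (fun a line => a + PySem.Str.len line) acc = acc + pvS xs := by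
  induction xs generalizing acc with
  | nil => simp [pvS]
  | cons x xs ih =>
      rw [List.foldl_cons, ih]
      simp only [pvS, List.map_cons, List.sum_cons]
      ring

theorem pvDropLoopB_eq_pvG (overlap_chars : Int) (xs : List String) :
    pvDropLoopB overlap_chars xs (pvS xs) = pvG overlap_chars xs := by
  induction xs with
  | nil => rfl
  | cons x xs ih =>
      have h : pvS (x :: xs) - PySem.Str.len x = pvS xs := by
        simp [pvS, List.map_cons]
      simp only [pvDropLoopB, pvG, h]
      split <;> simp [ih]

theorem pvG_append_singleton (θ : Int) (hθ : 0 < θ) (ys : List String) (l : String) :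
    pvG θ (ys ++ [l]) =
      if PySem.Str.len l ≥ θ then [l] else pvG (θ - PySem.Str.len l) ys ++ [l] := by
  induction ys with
  | nil =>
      have h0 : ¬ pvS ([] : List String) ≥ θ := by simp [pvS]; omega
      simp only [List.nil_append, pvG, h0, if_false]
      split <;> rfl
  | cons y ys ih =>
      have hlen := pvStrLen_nonneg l
      have hS := pvS_nonneg ys
      have hSapp : pvS (ys ++ [l]) = pvS ys + PySem.Str.len l := by
        simp only [pvS, List.map_append, List.sum_append, List.map_cons, List.map_nil,
          List.sum_cons, List.sum_nil]
        ring
      rw [List.cons_append]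
      simp only [pvG]
      by_cases hl : PySem.Str.len l ≥ θ
      · rw [if_pos (show pvS (ys ++ [l]) ≥ θ by omega), ih, if_pos hl, if_pos hl]
      · rw [if_neg hl]
        by_cases hy : pvS ys ≥ θ - PySem.Str.len l
        · rw [if_pos (show pvS (ys ++ [l]) ≥ θ by omega), ih, if_neg hl, if_pos hy]
        · rw [if_neg (show ¬ pvS (ys ++ [l]) ≥ θ by omega), if_neg hy, List.cons_append]

theorem pvTailLoopA_eq (overlap_chars : Int) (M : List String) :
    ∀ (cnt : Int) (tail : List String), cnt < overlap_chars →
      pvTailLoopA overlap_chars M tail cnt = pvG (overlap_chars - cnt) M.reverse ++ tail := by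
  induction M with
  | nil => intro cnt tail _; simp [pvTailLoopA, pvG]
  | cons l M ih =>
      intro cnt tail hcnt
      have hlen := pvStrLen_nonneg l
      have hins : PySem.List.insert tail 0 l = l :: tail := PySem.List.insert_zero tail l
      simp only [pvTailLoopA, hins, List.reverse_cons]
      rw [pvG_append_singleton (overlap_chars - cnt) (by omega)]
      by_cases hb : cnt + PySem.Str.len l ≥ overlap_chars
      · rw [if_pos hb, if_pos (by omega)]
        simp
      · rw [if_neg hb, if_neg (by omega)]
        rw [ih (cnt + PySem.Str.len l) (l :: tail) (by omega),
          show overlap_chars - cnt - PySem.Str.len l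
            = overlap_chars - (cnt + PySem.Str.len l) by ring]
        simp

-- ===== VERDICT (by name: the statement is the Claim_ definition above) =====
theorem tail_overlap_py_spec : Claim_equal_tail_overlap_py := by
  intro lines overlap_chars _
  unfold Spec_tail_overlap_py tail_overlap_py tail_overlap_py_alt
  by_cases h : overlap_chars ≤ 0
  · simp [h]
  · rw [if_neg h, if_neg h]
    rw [pvTailLoopA_eq overlap_chars lines.reverse 0 [] (by omega)]
    have ht : lines.foldl (fun acc line => acc + PySem.Str.len line) 0 = pvS lines := by
      simpa using pvS_foldl lines 0
    simp only [List.reverse_reverse, List.append_nil, ht, pvDropLoopB_eq_pvG]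
    norm_num
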